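-- pv_equiv track=rewrite | github.com/Annah-2003/Clash-code-files | Coding Escape/mayanCalculation.py | mayan_number_to_decimal
-- ===== SOURCE A (Python) =====
-- def mayan_number_to_decimal(numerals, l, h, number_lines):
--     sections = len(number_lines) // h
--     value = 0
--     for i in range(sections):
--         numeral = [number_lines[j + i * h] for j in range(h)]
--         numeral_key = ''.join(numeral)
--         if numeral_key in numerals:
--             value = value * 20 + numerals[numeral_key]
--     return value
-- ===== SOURCE B (Python) =====
-- def mayan_number_to_decimal(numerals, l, h, number_lines):
--     if h <= 0:
--         return 0
--     rest = number_lines[: (len(number_lines) // h) * h]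
--     value, weight = 0, 1
--     while rest:
--         key = ''.join(rest[-h:])
--         del rest[-h:]
--         if key in numerals:
--             value += numerals[key] * weight
--             weight *= 20
--     return value
-- ===== Notes on version B (the rewrite author's own statement) =====
-- stated objective: alternative
-- what changed: A scans sections front-to-back with a Horner multiply-add accumulator; B trims the leftover lines once, then consumes the trimmed list from the BACK in a while loop, peeling the last h-line block each step and accumulating value += digit*weight with a separately maintained weight that multiplies by 20 only when a block is recognised.
import Mathlib
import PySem

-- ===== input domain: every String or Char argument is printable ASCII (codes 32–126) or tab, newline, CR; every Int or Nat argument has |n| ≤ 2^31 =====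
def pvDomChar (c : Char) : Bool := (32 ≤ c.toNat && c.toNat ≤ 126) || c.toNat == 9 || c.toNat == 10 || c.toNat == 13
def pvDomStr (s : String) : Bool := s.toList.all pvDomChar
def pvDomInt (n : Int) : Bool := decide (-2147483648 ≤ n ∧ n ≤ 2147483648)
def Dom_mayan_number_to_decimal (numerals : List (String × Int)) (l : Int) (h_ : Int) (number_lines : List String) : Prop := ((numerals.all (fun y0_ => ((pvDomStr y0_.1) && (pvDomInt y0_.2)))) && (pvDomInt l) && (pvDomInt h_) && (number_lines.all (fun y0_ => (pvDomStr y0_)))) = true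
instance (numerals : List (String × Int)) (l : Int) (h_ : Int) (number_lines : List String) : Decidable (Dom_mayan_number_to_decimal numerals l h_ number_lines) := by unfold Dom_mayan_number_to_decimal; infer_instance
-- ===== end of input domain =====

-- B trims the leftover lines once, then consumes the trimmed list from the BACK, peeling the
-- last h-line block each step and accumulating value += digit*weight (weight *= 20 on a hit),
-- instead of A's front-to-back indexed Horner loop; same cost, different shape ('alternative').
-- Equivalence is about the return value only (B mutates a local copy, never its arguments).

-- ===== PORT A =====
def mayan_number_to_decimal (numerals : List (String × Int)) (l : Int) (h_ : Int) (number_lines : List String) : Int :=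
  (PySem.List.pyRange 0 (PySem.Int.floordiv (number_lines.length : Int) h_) 1).foldl
    (fun value i =>
      match numerals.lookup (PySem.Str.join ""
          ((PySem.List.pyRange 0 h_ 1).map (fun j => PySem.List.pyGetD number_lines (j + i * h_) ""))) with
      | some v => value * 20 + v
      | none => value) 0

-- ===== PORT B =====
-- the while loop of Source B; fuel = initial length is a totality guard only (each
-- iteration removes at least one element when 1 ≤ h_, the only way it is entered)
def mayanGo (numerals : List (String × Int)) (h_ : Int) (fuel : Nat)
    (rest : List String) (value weight : Int) : Int :=
  match fuel with
  | 0 => value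
  | fuel + 1 =>
    if rest = [] then value
    else
      match numerals.lookup (PySem.Str.join "" (PySem.List.slice rest (some (-h_)) none)) with
      | some v => mayanGo numerals h_ fuel (PySem.List.slice rest none (some (-h_)))
          (value + v * weight) (weight * 20)
      | none => mayanGo numerals h_ fuel (PySem.List.slice rest none (some (-h_))) value weight

def mayan_number_to_decimal_alt (numerals : List (String × Int)) (l : Int) (h_ : Int) (number_lines : List String) : Int :=
  if h_ ≤ 0 then 0
  else
    mayanGo numerals h_
      (PySem.List.slice number_lines none
        (some (PySem.Int.floordiv (number_lines.length : Int) h_ * h_))).length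
      (PySem.List.slice number_lines none
        (some (PySem.Int.floordiv (number_lines.length : Int) h_ * h_))) 0 1

-- ===== PRECONDITION & SPEC =====
-- Pre_ excludes only h_ = 0, where Python A raises ZeroDivisionError on len(number_lines) // h.
def Pre_mayan_number_to_decimal (numerals : List (String × Int)) (l : Int) (h_ : Int) (number_lines : List String) : Prop := h_ ≠ 0
instance (numerals : List (String × Int)) (l : Int) (h_ : Int) (number_lines : List String) : Decidable (Pre_mayan_number_to_decimal numerals l h_ number_lines) := by unfold Pre_mayan_number_to_decimal; infer_instance
def pvWitness_mayan_number_to_decimal : (List (String × Int)) × Int × Int × List String := ([("ab", 5), ("cd", 3)], 0, 1, ["ab", "cd"])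
def Spec_mayan_number_to_decimal (numerals : List (String × Int)) (l : Int) (h_ : Int) (number_lines : List String) (out : Int) : Prop := out = mayan_number_to_decimal_alt numerals l h_ number_lines
instance (numerals : List (String × Int)) (l : Int) (h_ : Int) (number_lines : List String) (out : Int) : Decidable (Spec_mayan_number_to_decimal numerals l h_ number_lines out) := by unfold Spec_mayan_number_to_decimal; infer_instance

-- ===== CLAIM (what is proved, stated in full; the proofs are below) =====
def Claim_equal_mayan_number_to_decimal : Prop := ∀ (numerals : List (String × Int)) (l : Int) (h_ : Int) (number_lines : List String), Dom_mayan_number_to_decimal numerals l h_ number_lines → Pre_mayan_number_to_decimal numerals l h_ number_lines → Spec_mayan_number_to_decimal numerals l h_ number_lines (mayan_number_to_decimal numerals l h_ number_lines)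

-- ===== LEMMAS AND PROOFS =====

-- the per-section optional digit, over Nat block index and block height
def pvDigit (numerals : List (String × Int)) (lines : List String) (hN : Nat) (i : Nat) : Option Int :=
  numerals.lookup (PySem.Str.join "" ((lines.drop (i * hN)).take hN))

-- Horner value of a digit list
def pvHorner (ds : List Int) : Int := ds.foldl (fun v d => v * 20 + d) 0

theorem pvHorner_append (ds : List Int) (d : Int) :
    pvHorner (ds ++ [d]) = pvHorner ds * 20 + d := by
  simp [pvHorner]

-- ---- A side: the Horner fold over pyRange equals pvHorner of the filterMapped digits ----

theorem pvHornerFold_eq (f : Int → Option Int) (L : List Int) (v : Int) :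
    L.foldl (fun value i => match f i with | some d => value * 20 + d | none => value) v
      = (L.filterMap f).foldl (fun v d => v * 20 + d) v := by
  induction L generalizing v with
  | nil => rfl
  | cons a L ih =>
    simp only [List.foldl_cons, List.filterMap_cons]
    cases h : f a with
    | none => simp [ih]
    | some d => simp [ih]

-- segment extracted by A's index comprehension = take/drop block
theorem pvSegment_eq (xs : List String) (a n : Nat) (hb : a + n ≤ xs.length) :
    (PySem.List.pyRange 0 (n : Int) 1).map (fun j => PySem.List.pyGetD xs (j + (a : Int)) "")
      = (xs.drop a).take n := by
  apply List.ext_getElem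
  · simp only [List.length_map, PySem.List.length_pyRange_one, List.length_take,
      List.length_drop]
    omega
  · intro k h1 h2
    have hk : k < n := by
      simpa [PySem.List.length_pyRange_one] using h1
    simp only [List.getElem_map]
    rw [PySem.List.getElem_pyRange_one]
    rw [PySem.List.pyGetD_eq_getElem _ _ (by positivity) (by push_cast; omega)]
    simp only [List.getElem_take, List.getElem_drop]
    congr 1
    omega

theorem pvA_eq_horner (numerals : List (String × Int)) (l h_ : Int) (lines : List String)
    (hN : Nat) (hNeq : h_ = (hN : Int)) :
    mayan_number_to_decimal numerals l h_ lines
      = pvHorner ((List.range (lines.length / hN)).filterMap (pvDigit numerals lines hN)) := by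
  subst hNeq
  unfold mayan_number_to_decimal
  rw [PySem.Int.floordiv_natCast, pvHornerFold_eq]
  unfold pvHorner
  congr 1
  rw [PySem.List.pyRange_zero_natCast (lines.length / hN), List.filterMap_map]
  apply List.filterMap_congr
  intro k hk
  have hklt : k < lines.length / hN := List.mem_range.mp hk
  have hmul : (k + 1) * hN = k * hN + hN := by ring
  have hbound : k * hN + hN ≤ lines.length := by
    have h1 : (k + 1) * hN ≤ (lines.length / hN) * hN := Nat.mul_le_mul_right _ hklt
    have h2 : (lines.length / hN) * hN ≤ lines.length := Nat.div_mul_le_self _ _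
    omega
  simp only [Function.comp_apply, pvDigit]
  have hoff : ∀ j : Int, j + (k : Int) * (hN : Int) = j + ((k * hN : Nat) : Int) := by
    intro j; push_cast [Nat.cast_mul]; ring
  have hseg : (PySem.List.pyRange 0 ((hN : Nat) : Int) 1).map
        (fun j => PySem.List.pyGetD lines (j + (k : Int) * ((hN : Nat) : Int)) "")
      = (lines.drop (k * hN)).take hN :=
    calc (PySem.List.pyRange 0 ((hN : Nat) : Int) 1).map
          (fun j => PySem.List.pyGetD lines (j + (k : Int) * ((hN : Nat) : Int)) "")
        = (PySem.List.pyRange 0 ((hN : Nat) : Int) 1).map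
            (fun j => PySem.List.pyGetD lines (j + ((k * hN : Nat) : Int)) "") :=
          List.map_congr_left (fun j _ => by rw [hoff j])
      _ = (lines.drop (k * hN)).take hN := pvSegment_eq lines (k * hN) hN hbound
  rw [hseg]

-- ---- B side: the back-to-front weight loop computes v + w * pvHorner of the same digits ----

theorem pvGo_spec (numerals : List (String × Int)) (lines : List String) (h_ : Int)
    (hN : Nat) (hNeq : h_ = (hN : Int)) (hN1 : 1 ≤ hN) (m : Nat) (hm : m * hN ≤ lines.length) :
    ∀ (fuel : Nat), m * hN ≤ fuel → ∀ (v w : Int),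
    mayanGo numerals h_ fuel (lines.take (m * hN)) v w
      = v + w * pvHorner ((List.range m).filterMap (pvDigit numerals lines hN)) := by
  subst hNeq
  induction m with
  | zero =>
    intro fuel _ v w
    cases fuel <;> simp [mayanGo, pvHorner]
  | succ m ih =>
    intro fuel hfuel v w
    have hmul : (m + 1) * hN = m * hN + hN := by ring
    obtain ⟨fuel', rfl⟩ : ∃ f', fuel = f' + 1 := ⟨fuel - 1, by omega⟩
    have hlen : (lines.take ((m + 1) * hN)).length = (m + 1) * hN := by
      simp only [List.length_take]; omega
    have hne : lines.take ((m + 1) * hN) ≠ [] := by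
      intro hnil
      rw [hnil] at hlen
      simp only [List.length_nil] at hlen
      omega
    unfold mayanGo
    rw [if_neg hne]
    have hkey : PySem.List.slice (lines.take ((m + 1) * hN)) (some (-((hN : Nat) : Int))) none
        = (lines.drop (m * hN)).take hN := by
      rw [PySem.List.slice_from_neg_natCast _ _ (by omega), hlen]
      have h1 : (m + 1) * hN - hN = m * hN := by omega
      rw [h1, List.drop_take]
      congr 1
      omega
    have hrest : PySem.List.slice (lines.take ((m + 1) * hN)) none (some (-((hN : Nat) : Int)))
        = lines.take (m * hN) := by
      rw [PySem.List.slice_to_neg_natCast _ _ (by omega), hlen, List.take_take]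
      congr 1
      omega
    rw [hkey, hrest, List.range_succ, List.filterMap_append, List.filterMap_cons,
      List.filterMap_nil]
    have hm' : m * hN ≤ lines.length := by omega
    have hfuel' : m * hN ≤ fuel' := by omega
    have hpd : numerals.lookup (PySem.Str.join "" ((lines.drop (m * hN)).take hN))
        = pvDigit numerals lines hN m := rfl
    rw [hpd]
    cases hd : pvDigit numerals lines hN m with
    | none =>
      dsimp only
      rw [List.append_nil, ih hm' fuel' hfuel' v w]
    | some d =>
      dsimp only
      rw [ih hm' fuel' hfuel' (v + d * w) (w * 20), pvHorner_append]
      ring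

theorem pvB_eq_horner (numerals : List (String × Int)) (l h_ : Int) (lines : List String)
    (hN : Nat) (hNeq : h_ = (hN : Int)) (hN1 : 1 ≤ hN) :
    mayan_number_to_decimal_alt numerals l h_ lines
      = pvHorner ((List.range (lines.length / hN)).filterMap (pvDigit numerals lines hN)) := by
  subst hNeq
  unfold mayan_number_to_decimal_alt
  rw [if_neg (by omega)]
  have hsec : PySem.Int.floordiv (lines.length : Int) ((hN : Nat) : Int) * ((hN : Nat) : Int)
      = (((lines.length / hN) * hN : Nat) : Int) := by
    rw [PySem.Int.floordiv_natCast]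
    push_cast [Nat.cast_mul]
    ring
  rw [hsec, PySem.List.slice_to_natCast]
  have hsecle : (lines.length / hN) * hN ≤ lines.length := Nat.div_mul_le_self _ _
  have hlen : (lines.take ((lines.length / hN) * hN)).length = (lines.length / hN) * hN := by
    simp only [List.length_take]; omega
  rw [hlen]
  rw [pvGo_spec numerals lines _ hN rfl hN1 (lines.length / hN) hsecle _ le_rfl 0 1]
  ring

-- ---- main equality ----

theorem mayan_eq (numerals : List (String × Int)) (l : Int) (h_ : Int) (number_lines : List String)
    (hpre : h_ ≠ 0) :
    mayan_number_to_decimal numerals l h_ number_lines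
      = mayan_number_to_decimal_alt numerals l h_ number_lines := by
  rcases lt_or_gt_of_ne hpre with hneg | hpos
  · -- h_ < 0: A's range is empty (sections ≤ 0), B returns 0 from its guard
    unfold mayan_number_to_decimal mayan_number_to_decimal_alt
    have hle : PySem.Int.floordiv (number_lines.length : Int) h_ ≤ 0 := by
      by_contra hc
      rw [not_le] at hc
      have := PySem.Int.floordiv_mul_add_mod (number_lines.length : Int) h_
      have hm := (PySem.Int.mod_neg_bounds (number_lines.length : Int) hneg).2
      nlinarith [Int.natCast_nonneg number_lines.length]
    rw [PySem.List.pyRange_one_eq_nil hle]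
    simp [hneg.le]
  · rw [pvA_eq_horner numerals l h_ number_lines h_.toNat (by omega),
      pvB_eq_horner numerals l h_ number_lines h_.toNat (by omega) (by omega)]

-- ===== VERDICT (by name: the statement is the Claim_ definition above) =====
theorem mayan_number_to_decimal_spec : Claim_equal_mayan_number_to_decimal := by
  intro numerals l h_ number_lines _ hpre
  unfold Spec_mayan_number_to_decimal
  exact mayan_eq numerals l h_ number_lines hpre
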